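-- pv_equiv track=rewrite | github.com/ucsb-mlsec/Co-PatcheR | patchpilot/repair/utils.py | find_matching_block
-- ===== SOURCE A (Python) =====
-- def strip_indent(lines: list[str]) -> list[str]:
--     return [line.lstrip() for line in lines]
--
-- def find_matching_block(source_lines: list[str], search_lines: list[str]) -> int:
--     stripped_source = strip_indent(source_lines)
--     stripped_search = strip_indent(search_lines)
--
--     search_len = len(stripped_search)
--
--     for i in range(len(stripped_source) - search_len + 1):
--         if stripped_source[i:i + search_len] == stripped_search:
--             return i
--     return -1
-- ===== SOURCE B (Python) =====
-- def find_matching_block(source_lines: list[str], search_lines: list[str]) -> int: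
--     # Offset-voting with an inverted index: each source position i whose stripped
--     # line equals stripped pattern line j casts a vote for the window start i - j;
--     # a window start d matches exactly when it collects one vote per pattern line.
--     pat = [line.lstrip() for line in search_lines]
--     m = len(pat)
--     if m == 0:
--         return 0
--     src = [line.lstrip() for line in source_lines]
--     n = len(src)
--     # inverted index: stripped line -> list of its positions in src
--     pos = {}
--     for i, line in enumerate(src):
--         pos.setdefault(line, []).append(i)
--     # vote for window starts
--     votes = {}
--     for j, pline in enumerate(pat):
--         for i in pos.get(pline, []):
--             d = i - j
--             if 0 <= d <= n - m:
--                 votes[d] = votes.get(d, 0) + 1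
--     for d in range(n - m + 1):
--         if votes.get(d, 0) == m:
--             return d
--     return -1
-- ===== Notes on version B (the rewrite author's own statement) =====
-- stated objective: alternative
-- what changed: A compares a freshly built m-line slice against the stripped search block at every window start; B instead builds an inverted index from each stripped line to its positions, has every matching (pattern line j, source position i) pair vote for window start i - j in a counter dict, and returns the first start that collects one vote per pattern line - no slice is ever built or compared.
import Mathlib
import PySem

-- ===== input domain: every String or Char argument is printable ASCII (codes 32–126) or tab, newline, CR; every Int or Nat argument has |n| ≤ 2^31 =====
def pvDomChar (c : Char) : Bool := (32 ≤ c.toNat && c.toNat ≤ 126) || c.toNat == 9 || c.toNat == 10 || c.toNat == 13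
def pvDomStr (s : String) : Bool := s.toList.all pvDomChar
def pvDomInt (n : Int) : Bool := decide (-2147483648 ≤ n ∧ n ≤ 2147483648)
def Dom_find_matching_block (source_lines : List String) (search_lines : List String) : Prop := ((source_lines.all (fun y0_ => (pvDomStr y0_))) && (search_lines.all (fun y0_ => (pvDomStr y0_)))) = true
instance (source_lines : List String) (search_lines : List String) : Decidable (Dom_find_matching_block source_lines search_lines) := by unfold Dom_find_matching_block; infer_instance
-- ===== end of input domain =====

-- B replaces A's slice comparison at every window start by offset voting over an
-- inverted index (stripped line -> its positions); a window start d matches exactly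
-- when it collects one vote per pattern line (objective: alternative).

-- ===== PORT A =====
-- the 'for i in range(...): if slice == search: return i' loop of A
def fmbLoopA (stripped_source stripped_search : List String) (search_len : Int) : List Int → Int
  | [] => -1
  | i :: rest =>
    if PySem.List.slice stripped_source (some i) (some (i + search_len)) = stripped_search
    then i else fmbLoopA stripped_source stripped_search search_len rest

def find_matching_block (source_lines : List String) (search_lines : List String) : Int :=
  let stripped_source := source_lines.map PySem.Str.lstrip
  let stripped_search := search_lines.map PySem.Str.lstrip
  let search_len : Int := (stripped_search.length : Int)
  fmbLoopA stripped_source stripped_search search_len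
    (PySem.List.pyRange 0 ((stripped_source.length : Int) - search_len + 1))

-- ===== PORT B =====
-- the final 'for d in range(n - m + 1): if votes.get(d, 0) == m: return d' loop of B
def fmbScanB (votes : PySem.Dict Int Int) (m : Int) : List Int → Int
  | [] => -1
  | d :: t => if votes.getD d 0 == m then d else fmbScanB votes m t

def find_matching_block_alt (source_lines : List String) (search_lines : List String) : Int :=
  let pat := search_lines.map PySem.Str.lstrip
  let m : Int := (pat.length : Int)
  if pat.isEmpty then 0
  else
    let src := source_lines.map PySem.Str.lstrip
    let n : Int := (src.length : Int)
    -- pos[line] = pos.get(line, []) + [i]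
    let pos := (PySem.List.enumerate src).foldl
        (fun d p => d.modify p.2 [] (· ++ [p.1])) PySem.Dict.empty
    -- votes[d] = votes.get(d, 0) + 1 for each matching (j, i) with d = i - j in range
    let votes := (PySem.List.enumerate pat).foldl
        (fun v jp => (pos.getD jp.2 []).foldl
            (fun v i =>
              if 0 ≤ i - jp.1 ∧ i - jp.1 ≤ n - m then v.modify (i - jp.1) 0 (· + 1) else v) v)
        PySem.Dict.empty
    fmbScanB votes m (PySem.List.pyRange 0 (n - m + 1))

-- ===== PRECONDITION & SPEC =====
def Spec_find_matching_block (source_lines : List String) (search_lines : List String) (out : Int) : Prop := out = find_matching_block_alt source_lines search_lines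
instance (source_lines : List String) (search_lines : List String) (out : Int) : Decidable (Spec_find_matching_block source_lines search_lines out) := by unfold Spec_find_matching_block; infer_instance

-- ===== CLAIM (what is proved, stated in full; the proofs are below) =====
def Claim_equal_find_matching_block : Prop := ∀ (source_lines : List String) (search_lines : List String), Dom_find_matching_block source_lines search_lines → Spec_find_matching_block source_lines search_lines (find_matching_block source_lines search_lines)

-- ===== LEMMAS AND PROOFS =====

lemma fmbLoopA_eq_find? (ss se : List String) (sl : Int) (l : List Int) :
    fmbLoopA ss se sl l
      = (l.find? (fun i => decide (PySem.List.slice ss (some i) (some (i + sl)) = se))).getD (-1) := by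
  induction l with
  | nil => simp [fmbLoopA]
  | cons i t ih =>
    simp only [fmbLoopA, List.find?_cons]
    split_ifs with h <;> simp [h, ih]

lemma fmbScanB_eq_find? (v : PySem.Dict Int Int) (m : Int) (l : List Int) :
    fmbScanB v m l = (l.find? (fun d => v.getD d 0 == m)).getD (-1) := by
  induction l with
  | nil => simp [fmbScanB]
  | cons d t ih =>
    simp only [fmbScanB, List.find?_cons]
    cases h : (v.getD d 0 == m) <;> simp [h] <;> exact ih

lemma find?_congr_mem {α : Type} (l : List α) (p q : α → Bool) (h : ∀ x ∈ l, p x = q x) :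
    l.find? p = l.find? q := by
  induction l with
  | nil => rfl
  | cons x t ih =>
    simp only [List.find?_cons, h x (by simp)]
    split <;> simp_all

lemma pyRange_zero_int (k : Int) :
    PySem.List.pyRange 0 k = List.map (fun i : Nat => (i : Int)) (List.range k.toNat) := by
  rcases (by omega : k ≤ 0 ∨ 0 < k) with h | h
  · rw [show k.toNat = 0 by omega]
    simp [PySem.List.pyRange]
    omega
  · have h1 : ((k.toNat : Nat) : Int) = k := by omega
    calc PySem.List.pyRange 0 k = PySem.List.pyRange 0 ((k.toNat : Nat) : Int) := by rw [h1]
      _ = List.map (fun i : Nat => (i : Int)) (List.range k.toNat) := PySem.List.pyRange_zero_natCast _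

-- the inverted index: pos.get(s, []) is the list of first components whose line is s
lemma fmb_pos_getD (l : List (Int × String)) (s : String) :
    (l.foldl (fun d p => d.modify p.2 [] (· ++ [p.1])) PySem.Dict.empty).getD s []
      = (l.filter (fun p => p.2 == s)).map (·.1) := by
  rw [show (l.foldl (fun d p => d.modify p.2 [] (· ++ [p.1])) PySem.Dict.empty
          : PySem.Dict String (List Int))
        = (l.map (fun p => (p.2, p.1))).foldl (fun d q => d.modify q.1 [] (· ++ [q.2]))
            PySem.Dict.empty from by rw [List.foldl_map]]
  rw [PySem.Dict.getD_foldl_modify_append]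
  simp [List.filter_map, List.map_map, Function.comp_def]

-- the guarded counting loop is a counter over the filterMapped votes
lemma fmb_foldl_ite_modify (c : Int → Prop) [DecidablePred c] (g : Int → Int)
    (l : List Int) (v : PySem.Dict Int Int) :
    l.foldl (fun v i => if c i then v.modify (g i) 0 (· + 1) else v) v
      = (l.filterMap (fun i => if c i then some (g i) else none)).foldl
          (fun v d => v.modify d 0 (· + 1)) v := by
  induction l generalizing v with
  | nil => rfl
  | cons i t ih =>
    simp only [List.foldl_cons, List.filterMap_cons]
    split_ifs with h <;> simp [ih]

lemma fmb_count_flatMap {α : Type} (l : List α) (g : α → List Int) (d : Int) :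
    (l.flatMap g).count d = (l.map (fun x => (g x).count d)).sum := by
  induction l with
  | nil => rfl
  | cons x t ih => simp [List.flatMap_cons, List.count_append, ih]

lemma fmb_countP_range_pin (n t : Nat) (p : Nat → Bool) :
    (List.range n).countP (fun k => (k == t) && p k) = if t < n ∧ p t then 1 else 0 := by
  induction n with
  | zero => simp
  | succ n ih =>
    rw [List.range_succ, List.countP_append, ih, List.countP_cons, List.countP_nil]
    by_cases ht : t = n
    · subst ht
      by_cases hp : p t <;> simp [hp]
    · have hne : (n == t) = false := by simp [Ne.symm ht]
      have hiff : (t < n + 1) ↔ t < n := by omega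
      simp [hne, hiff]

-- votes.get(d, 0) counts, for d a valid window start, the pattern lines that match
lemma fmb_votes_getD (src pat : List String) (d : Nat)
    (hd : d + pat.length ≤ src.length) :
    ((PySem.List.enumerate pat).foldl
        (fun v jp => (((PySem.List.enumerate src).foldl
              (fun d p => d.modify p.2 [] (· ++ [p.1])) PySem.Dict.empty).getD jp.2 []).foldl
            (fun v i =>
              if 0 ≤ i - jp.1 ∧ i - jp.1 ≤ (src.length : Int) - (pat.length : Int)
              then v.modify (i - jp.1) 0 (· + 1) else v) v)
        PySem.Dict.empty).getD (d : Int) 0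
      = ((List.range pat.length).countP
          (fun j => src.getD (d + j) "" == pat.getD j "") : Int) := by
  -- normalise the nested loop into a single counter over a flatMap
  simp only [fmb_pos_getD, fmb_foldl_ite_modify]
  rw [show (List.foldl (fun v jp => List.foldl (fun v d => v.modify d 0 (· + 1)) v
          (List.filterMap (fun i => if 0 ≤ i - jp.1 ∧ i - jp.1
                ≤ (src.length : Int) - (pat.length : Int) then some (i - jp.1) else none)
            (List.map (fun x => x.1) (List.filter (fun p => p.2 == jp.2)
              (PySem.List.enumerate src)))))
        (PySem.Dict.empty : PySem.Dict Int Int) (PySem.List.enumerate pat))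
      = List.foldl (fun v d => v.modify d 0 (· + 1)) (PySem.Dict.empty : PySem.Dict Int Int)
          ((PySem.List.enumerate pat).flatMap (fun jp =>
            List.filterMap (fun i => if 0 ≤ i - jp.1 ∧ i - jp.1
                  ≤ (src.length : Int) - (pat.length : Int) then some (i - jp.1) else none)
              (List.map (fun x => x.1) (List.filter (fun p => p.2 == jp.2)
                (PySem.List.enumerate src)))))
      from by rw [List.foldl_flatMap]]
  rw [PySem.Dict.getD_foldl_modify_add_one]
  rw [show (PySem.Dict.empty : PySem.Dict Int Int).getD (d : Int) 0 = 0 from rfl]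
  rw [fmb_count_flatMap]
  -- the contribution of pattern line j at source position i = d + j
  have hinner : ∀ j : Nat, j < pat.length →
      ((((PySem.List.enumerate src).filter
            (fun p => p.2 == PySem.List.pyGetD pat (j : Int) "")).map (·.1)).filterMap
          (fun i => if 0 ≤ i - (j : Int) ∧ i - (j : Int) ≤ (src.length : Int) - (pat.length : Int)
                    then some (i - (j : Int)) else none)).count (d : Int)
        = if src.getD (d + j) "" == pat.getD j "" then 1 else 0 := by
    intro j hj
    rw [List.count_filterMap, List.countP_map, List.countP_filter]
    rw [PySem.List.enumerate_eq_map_pyRange src ""]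
    rw [show PySem.List.len src = ((src.length : Nat) : Int) from by simp [PySem.List.len]]
    rw [PySem.List.pyRange_zero_natCast, List.map_map, List.countP_map]
    have hdn : (d : Int) ≤ (src.length : Int) - (pat.length : Int) := by push_cast; omega
    have hfun : (fun k : Nat =>
        ((if 0 ≤ (k : Int) - (j : Int)
              ∧ (k : Int) - (j : Int) ≤ (src.length : Int) - (pat.length : Int)
            then some ((k : Int) - (j : Int)) else none) == some (d : Int))
          && (PySem.List.pyGetD src (k : Int) "" == PySem.List.pyGetD pat (j : Int) ""))
        = (fun k : Nat => (k == d + j) && (src.getD k "" == pat.getD j "")) := by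
      funext k
      simp only [PySem.List.pyGetD_natCast]
      by_cases hkd : k = d + j
      · subst hkd
        have hc : 0 ≤ ((d + j : Nat) : Int) - (j : Int)
            ∧ ((d + j : Nat) : Int) - (j : Int) ≤ (src.length : Int) - (pat.length : Int) := by
          omega
        simp only [hc, and_self, if_true, beq_self_eq_true, Bool.true_and]
        simp
      · have hne : ¬ ((k : Int) - (j : Int) = (d : Int)) := by omega
        have e1 : (((if 0 ≤ (k : Int) - (j : Int)
              ∧ (k : Int) - (j : Int) ≤ (src.length : Int) - (pat.length : Int)
            then some ((k : Int) - (j : Int)) else none) : Option Int) == some (d : Int)) = false := by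
          split_ifs with hc <;> simp [hne]
        have e2 : (k == d + j) = false := by simp [hkd]
        rw [e1, e2]
    simp only [Function.comp_def]
    rw [hfun, fmb_countP_range_pin]
    have hlt : d + j < src.length := by omega
    simp [hlt]
  -- sum the 0/1 contributions over the enumerated pattern
  rw [PySem.List.enumerate_eq_map_pyRange pat ""]
  rw [show PySem.List.len pat = ((pat.length : Nat) : Int) from by simp [PySem.List.len]]
  rw [PySem.List.pyRange_zero_natCast, List.map_map, List.map_map]
  simp only [Function.comp_def]
  have hsum : ∀ l : List Nat, (∀ j ∈ l, j < pat.length) →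
      (l.map (fun j : Nat =>
          ((((PySem.List.enumerate src).filter
                (fun p => p.2 == PySem.List.pyGetD pat (j : Int) "")).map (·.1)).filterMap
              (fun i => if 0 ≤ i - (j : Int)
                          ∧ i - (j : Int) ≤ (src.length : Int) - (pat.length : Int)
                        then some (i - (j : Int)) else none)).count (d : Int))).sum
        = l.countP (fun j => src.getD (d + j) "" == pat.getD j "") := by
    intro l
    induction l with
    | nil => intro _; rfl
    | cons j t ih =>
      intro hl
      rw [List.map_cons, List.sum_cons, ih (fun x hx => hl x (by simp [hx]))]
      rw [hinner j (hl j (by simp)), List.countP_cons]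
      by_cases h : src.getD (d + j) "" == pat.getD j "" <;> simp [h] <;> omega
  rw [hsum (List.range pat.length) (fun j hj => by simpa using hj)]
  simp

-- a window equals the pattern iff every line of it matches
lemma fmb_window_eq_iff (src pat : List String) (d : Nat)
    (hd : d + pat.length ≤ src.length) :
    (List.take pat.length (List.drop d src) = pat)
      ↔ ∀ j ∈ List.range pat.length, src.getD (d + j) "" = pat.getD j "" := by
  constructor
  · intro h j hj
    simp only [List.mem_range] at hj
    have h1 : d + j < src.length := by omega
    have h2 := congrArg (fun l : List String => l[j]?) h
    simp only [List.getElem?_take, List.getElem?_drop, hj, if_pos] at h2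
    rw [List.getD_eq_getElem?_getD, List.getD_eq_getElem?_getD, h2]
  · intro h
    apply List.ext_getElem
    · simp; omega
    · intro j h1 h2
      simp only [List.length_take, List.length_drop] at h1
      have hj : j < pat.length := by omega
      have h3 : d + j < src.length := by omega
      have := h j (by simpa using hj)
      rw [List.getD_eq_getElem src "" h3, List.getD_eq_getElem pat "" hj] at this
      simpa using this

theorem find_matching_block_spec : Claim_equal_find_matching_block := by
  intro source_lines search_lines _hdom
  unfold Spec_find_matching_block find_matching_block find_matching_block_alt
  by_cases hse : (search_lines.map PySem.Str.lstrip).isEmpty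
  · -- empty pattern: A finds index 0 immediately, B returns 0 directly
    rw [List.isEmpty_iff] at hse
    simp only [hse, List.isEmpty_nil, if_true]
    rw [fmbLoopA_eq_find?, pyRange_zero_int]
    norm_num
    rw [List.range_succ_eq_map, List.find?_cons_of_pos]
    · simp
    · simp [pysem]
  · simp only [hse]
    rw [fmbLoopA_eq_find?, fmbScanB_eq_find?]
    rw [pyRange_zero_int, List.find?_map, List.find?_map]
    congr 1
    congr 1
    apply find?_congr_mem
    intro k hk
    simp only [List.mem_range] at hk
    have hd : k + (search_lines.map PySem.Str.lstrip).length
        ≤ (source_lines.map PySem.Str.lstrip).length := by omega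
    simp only [Function.comp_def]
    rw [Bool.eq_iff_iff]
    simp only [decide_eq_true_eq, beq_iff_eq]
    rw [PySem.List.slice_natCast_add,
        fmb_votes_getD (source_lines.map PySem.Str.lstrip) (search_lines.map PySem.Str.lstrip) k hd,
        fmb_window_eq_iff (source_lines.map PySem.Str.lstrip) (search_lines.map PySem.Str.lstrip) k hd]
    constructor
    · intro h
      rw [List.countP_eq_length.mpr (fun j hj => by simpa using h j hj)]
      simp
    · intro h j hj
      have hc : ((List.range (search_lines.map PySem.Str.lstrip).length).countP
          (fun j => (source_lines.map PySem.Str.lstrip).getD (k + j) ""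
            == (search_lines.map PySem.Str.lstrip).getD j ""))
          = (search_lines.map PySem.Str.lstrip).length := by exact_mod_cast h
      have := List.countP_eq_length.mp (by rw [hc]; simp) j hj
      simpa using this
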